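-- pv_equiv track=rewrite | github.com/byyan2020/algorithms | parent-and-ancestor-q1.py | furtheast_ancestor
-- ===== SOURCE A (Python) =====
-- import collections
--
-- def furtheast_ancestor(input_list, node):
--     children_map = {}
--     for par, child in input_list:
--         children_map[child] = children_map.get(child, []) + [par]
--     distance = 0
--     res = None
--     queue = collections.deque([(node, 0)])
--     while queue:
--         cur_node, cur_d = queue.popleft()
--         cur_d += 1
--         if cur_d > distance:
--             distance = cur_d
--             res = cur_node
--         if cur_node not in children_map: continue
--         for next in children_map[cur_node]:
--             queue.append((next, cur_d))
--     return res
-- ===== SOURCE B (Python) =====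
-- def furtheast_ancestor(input_list, node):
--     parents = {}
--     for par, child in input_list:
--         parents.setdefault(child, []).append(par)
--     res = None
--     frontier = [node]
--     while frontier:
--         res = frontier[0]
--         frontier = [p for x in frontier for p in parents.get(x, [])]
--     return res
-- ===== Notes on version B (the rewrite author's own statement) =====
-- stated objective: simpler
-- what changed: Replaces A's FIFO-queue BFS carrying (node, depth) pairs and distance/res bookkeeping by a level-synchronous frontier iteration: the answer is the first element of the last nonempty frontier; Pre_ excludes inputs whose child-to-parent graph has a cycle reachable from node, on which A's while loop (and B's) never terminates.
import Mathlib
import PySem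

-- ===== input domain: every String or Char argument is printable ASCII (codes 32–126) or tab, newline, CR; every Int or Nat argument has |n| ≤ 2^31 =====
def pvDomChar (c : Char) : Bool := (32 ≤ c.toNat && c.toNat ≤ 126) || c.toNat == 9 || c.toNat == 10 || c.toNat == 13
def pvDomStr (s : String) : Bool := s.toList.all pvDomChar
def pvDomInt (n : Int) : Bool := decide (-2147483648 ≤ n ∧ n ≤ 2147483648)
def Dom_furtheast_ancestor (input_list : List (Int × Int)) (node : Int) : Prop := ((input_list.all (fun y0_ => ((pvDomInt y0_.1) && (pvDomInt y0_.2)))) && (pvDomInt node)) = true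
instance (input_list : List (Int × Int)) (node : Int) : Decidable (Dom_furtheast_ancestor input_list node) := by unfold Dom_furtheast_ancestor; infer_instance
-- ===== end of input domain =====

-- B replaces A's FIFO-queue BFS with depth/distance bookkeeping by a level-synchronous
-- frontier iteration (objective: simpler); equal answers are proved on all inputs whose
-- ancestor graph has no cycle reachable from `node` (elsewhere the Python A never returns).

-- ===== PORT A =====
-- children_map[child] = children_map.get(child, []) + [par]
def pvBuildA (l : List (Int × Int)) : PySem.Dict Int (List Int) :=
  l.foldl (fun d pc => d.insert pc.2 (d.getD pc.2 [] ++ [pc.1])) PySem.Dict.empty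

-- totality guard only: an upper bound on the number of loop iterations (queue pops) of the
-- while loop on terminating inputs; the answer is independent of the fuel once sufficient
def pvFuelA (cm : PySem.Dict Int (List Int)) : Nat → List Int → Nat
  | 0, _ => 0
  | k+1, fr => fr.length + pvFuelA cm k (fr.flatMap (fun x => cm.getD x []))

-- while queue: pop left; cur_d += 1; update distance/res; extend queue with parents
-- ('if cur_node not in children_map: continue' + the for-loop = extending with getD _ [])
def pvBfs (cm : PySem.Dict Int (List Int)) : Nat → List (Int × Int) → Int → Option Int → Option Int
  | 0, _, _, r => r
  | _+1, [], _, r => r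
  | f+1, (c, dpth) :: q, dist, r =>
      if dpth + 1 > dist then
        pvBfs cm f (q ++ (cm.getD c []).map (fun p => (p, dpth + 1))) (dpth + 1) (some c)
      else
        pvBfs cm f (q ++ (cm.getD c []).map (fun p => (p, dpth + 1))) dist r

def furtheast_ancestor (input_list : List (Int × Int)) (node : Int) : Option Int :=
  let cm := pvBuildA input_list
  pvBfs cm (pvFuelA cm (input_list.length + 1) [node]) [(node, 0)] 0 none

-- ===== PORT B =====
-- parents.setdefault(child, []).append(par)
def pvBuildB (l : List (Int × Int)) : PySem.Dict Int (List Int) :=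
  l.foldl (fun d pc => d.modify pc.2 [] (· ++ [pc.1])) PySem.Dict.empty

-- [p for x in frontier for p in parents.get(x, [])]
def pvExpand (pm : PySem.Dict Int (List Int)) (fr : List Int) : List Int :=
  fr.flatMap (fun x => pm.getD x [])

-- while frontier: res = frontier[0]; frontier = expansion   (fuel = totality guard only:
-- on cycle-free inputs the frontier is empty after at most length+1 steps)
def pvLv (pm : PySem.Dict Int (List Int)) : Nat → List Int → Option Int → Option Int
  | 0, _, r => r
  | _+1, [], r => r
  | f+1, x :: t, _ => pvLv pm f (pvExpand pm (x :: t)) (some x)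

def furtheast_ancestor_alt (input_list : List (Int × Int)) (node : Int) : Option Int :=
  let pm := pvBuildB input_list
  pvLv pm (input_list.length + 2) [node] none

-- ===== PRECONDITION & SPEC =====
-- direct parents of v in the input graph (an edge (par, child) points child → par)
def pvParents (l : List (Int × Int)) (v : Int) : List Int :=
  (l.filter (fun pc => pc.2 == v)).map Prod.fst

-- one closure step: add the parents of current members
def pvGrow (l : List (Int × Int)) (S : List Int) : List Int :=
  S ++ (l.filter (fun pc => decide (pc.2 ∈ S))).map Prod.fst

def pvGrowIter (l : List (Int × Int)) : Nat → List Int → List Int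
  | 0, S => S
  | k+1, S => pvGrowIter l k (pvGrow l S)

-- Pre_ excludes exactly the inputs whose ancestor (child→parent) graph has a cycle reachable
-- from `node`: on those the Python A's while loop never terminates (A returns no value).
def Pre_furtheast_ancestor (input_list : List (Int × Int)) (node : Int) : Prop :=
  ∀ v ∈ pvGrowIter input_list (input_list.length + 1) [node],
    v ∉ pvGrowIter input_list (input_list.length + 1) (pvParents input_list v)

instance (input_list : List (Int × Int)) (node : Int) : Decidable (Pre_furtheast_ancestor input_list node) := by unfold Pre_furtheast_ancestor; infer_instance

def pvWitness_furtheast_ancestor : (List (Int × Int)) × Int := ([(1, 2), (3, 2), (4, 1)], 2)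

def Spec_furtheast_ancestor (input_list : List (Int × Int)) (node : Int) (out : Option Int) : Prop := out = furtheast_ancestor_alt input_list node
instance (input_list : List (Int × Int)) (node : Int) (out : Option Int) : Decidable (Spec_furtheast_ancestor input_list node out) := by unfold Spec_furtheast_ancestor; infer_instance

-- ===== CLAIM (what is proved, stated in full; the proofs are below) =====
def Claim_equal_furtheast_ancestor : Prop := ∀ (input_list : List (Int × Int)) (node : Int), Dom_furtheast_ancestor input_list node → Pre_furtheast_ancestor input_list node → Spec_furtheast_ancestor input_list node (furtheast_ancestor input_list node)

-- ===== LEMMAS AND PROOFS =====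

-- The two map builders produce the same dictionary (modify _ [] (· ++ [x]) is insert of the
-- appended value).
theorem pvBuild_eq (l : List (Int × Int)) : pvBuildB l = pvBuildA l := rfl

theorem pvParents_mem (l : List (Int × Int)) (v p : Int) :
    p ∈ pvParents l v ↔ (p, v) ∈ l := by
  simp only [pvParents, List.mem_map, List.mem_filter, beq_iff_eq]
  constructor
  · rintro ⟨⟨a, b⟩, ⟨hm, hb⟩, ha⟩
    simpa [← ha, ← hb] using hm
  · intro h; exact ⟨(p, v), ⟨h, rfl⟩, rfl⟩

theorem pvBuildA_getD (l : List (Int × Int)) (c : Int) :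
    (pvBuildA l).getD c [] = pvParents l c := by
  suffices h : ∀ (d : PySem.Dict Int (List Int)),
      (l.foldl (fun d pc => d.insert pc.2 (d.getD pc.2 [] ++ [pc.1])) d).getD c []
        = d.getD c [] ++ pvParents l c by
    simpa [pvBuildA] using h PySem.Dict.empty
  induction l with
  | nil => intro d; simp [pvParents]
  | cons pc rest ih =>
    intro d
    simp only [List.foldl_cons, ih, pvParents, List.filter_cons]
    by_cases hc : pc.2 = c
    · simp [hc]
    · simp [PySem.Dict.getD_insert, hc, Ne.symm hc]

-- frontier iteration (levels of A's BFS / B's loop)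
def pvIter (pm : PySem.Dict Int (List Int)) : Nat → List Int → List Int
  | 0, fr => fr
  | k+1, fr => pvIter pm k (pvExpand pm fr)

theorem pvIter_succ' (pm : PySem.Dict Int (List Int)) (k : Nat) (fr : List Int) :
    pvIter pm (k+1) fr = pvExpand pm (pvIter pm k fr) := by
  induction k generalizing fr with
  | zero => rfl
  | succ k ih => exact ih (pvExpand pm fr)

theorem pvBfs_nil (cm : PySem.Dict Int (List Int)) (F : Nat) (dist : Int) (r : Option Int) :
    pvBfs cm F [] dist r = r := by
  cases F <;> rfl

theorem pvLv_nil (pm : PySem.Dict Int (List Int)) (G : Nat) (r : Option Int) :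
    pvLv pm G [] r = r := by
  cases G <;> rfl

-- within one BFS level the distance test fails and res is unchanged
theorem pvBfs_level (cm : PySem.Dict Int (List Int)) (d : Int) :
    ∀ (rest acc : List Int) (F : Nat) (r : Option Int), rest.length ≤ F →
    pvBfs cm F (rest.map (fun x => (x, d)) ++ acc.map (fun p => (p, d+1))) (d+1) r
      = pvBfs cm (F - rest.length) ((acc ++ pvExpand cm rest).map (fun p => (p, d+1))) (d+1) r := by
  intro rest
  induction rest with
  | nil => intro acc F r _; simp [pvExpand]
  | cons c rest ih =>
    intro acc F r hF
    cases F with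
    | zero => simp at hF
    | succ F =>
      simp only [List.map_cons, List.cons_append, pvBfs]
      rw [if_neg (by omega)]
      have hq : (rest.map (fun x => (x, d)) ++ acc.map (fun p => (p, d+1))) ++ (cm.getD c []).map (fun p => (p, d+1))
          = rest.map (fun x => (x, d)) ++ (acc ++ cm.getD c []).map (fun p => (p, d+1)) := by
        simp [List.map_append]
      rw [hq, ih (acc ++ cm.getD c []) F r (by simpa using Nat.le_of_succ_le_succ hF)]
      have he : (acc ++ cm.getD c []) ++ pvExpand cm rest = acc ++ pvExpand cm (c :: rest) := by
        simp [pvExpand]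
      rw [he]
      congr 1
      simp [Nat.succ_sub_succ]

-- main simulation: queue BFS over a full level = level iteration, given enough fuel
theorem pvBfs_eq_pvLv (pm : PySem.Dict Int (List Int)) :
    ∀ (m : Nat) (fr : List Int) (d : Int) (r : Option Int) (F G : Nat),
    pvIter pm m fr = [] → pvFuelA pm m fr ≤ F → m ≤ G →
    pvBfs pm F (fr.map (fun x => (x, d))) d r = pvLv pm G fr r := by
  intro m
  induction m with
  | zero =>
    intro fr d r F G hit _ _
    have : fr = [] := hit
    subst this
    simp [pvBfs_nil, pvLv_nil]
  | succ m ih =>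
    intro fr d r F G hit hF hG
    cases fr with
    | nil => simp [pvBfs_nil, pvLv_nil]
    | cons c rest =>
      have hF' : rest.length + 1 + pvFuelA pm m (pvExpand pm (c :: rest)) ≤ F := by
        simpa [pvFuelA, pvExpand, Nat.add_comm, Nat.add_assoc, Nat.add_left_comm] using hF
      cases F with
      | zero => omega
      | succ F =>
        cases G with
        | zero => omega
        | succ G =>
          simp only [List.map_cons, pvBfs, pvLv]
          rw [if_pos (by omega)]
          have hstep := pvBfs_level pm d rest (pm.getD c []) F (some c) (by omega)
          rw [hstep]
          have he : pm.getD c [] ++ pvExpand pm rest = pvExpand pm (c :: rest) := by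
            simp [pvExpand]
          rw [he]
          exact ih (pvExpand pm (c :: rest)) (d+1) (some c) (F - rest.length) G hit (by omega) (by omega)

-- acyclicity: closure-set lemmas
theorem pvGrow_subset (l : List (Int × Int)) (S : List Int) : ∀ x ∈ S, x ∈ pvGrow l S := by
  intro x hx; exact List.mem_append_left _ hx

theorem pvGrow_mono (l : List (Int × Int)) {S T : List Int} (h : ∀ x ∈ S, x ∈ T) :
    ∀ x ∈ pvGrow l S, x ∈ pvGrow l T := by
  intro x hx
  rcases List.mem_append.mp hx with hx | hx
  · exact List.mem_append_left _ (h x hx)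
  · refine List.mem_append_right _ ?_
    rcases List.mem_map.mp hx with ⟨pc, hpc, hx1⟩
    rcases List.mem_filter.mp hpc with ⟨hm, hS⟩
    exact List.mem_map.mpr ⟨pc, List.mem_filter.mpr ⟨hm, by simpa using h _ (by simpa using hS)⟩, hx1⟩

theorem pvGrow_parent (l : List (Int × Int)) {S : List Int} {a b : Int}
    (ha : a ∈ S) (hab : (b, a) ∈ l) : b ∈ pvGrow l S := by
  refine List.mem_append_right _ (List.mem_map.mpr ⟨(b, a), List.mem_filter.mpr ⟨hab, by simpa using ha⟩, rfl⟩)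

theorem pvGrowIter_mono (l : List (Int × Int)) :
    ∀ (k : Nat) {S T : List Int}, (∀ x ∈ S, x ∈ T) →
    ∀ x ∈ pvGrowIter l k S, x ∈ pvGrowIter l k T := by
  intro k
  induction k with
  | zero => intro S T h; exact h
  | succ k ih =>
    intro S T h
    exact ih (pvGrow_mono l h)

theorem pvGrowIter_succ (l : List (Int × Int)) (k : Nat) (S : List Int) :
    ∀ x ∈ pvGrowIter l k S, x ∈ pvGrowIter l (k+1) S := by
  intro x hx
  have : pvGrowIter l (k+1) S = pvGrowIter l k (pvGrow l S) := rfl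
  rw [this]
  exact pvGrowIter_mono l k (pvGrow_subset l S) x hx

theorem pvGrowIter_le (l : List (Int × Int)) {k k' : Nat} (hk : k ≤ k') (S : List Int) :
    ∀ x ∈ pvGrowIter l k S, x ∈ pvGrowIter l k' S := by
  induction k' with
  | zero =>
    intro x hx
    have : k = 0 := by omega
    subst this; exact hx
  | succ k' ih =>
    intro x hx
    rcases Nat.lt_or_ge k (k'+1) with h | h
    · exact pvGrowIter_succ l k' S x (ih (by omega) x hx)
    · have : k = k' + 1 := by omega
      subst this; exact hx

-- every node on a parent-chain from a lies in the closure of {a}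
theorem pvChain_mem_growIter (l : List (Int × Int)) :
    ∀ (t : List Int) (a : Int), List.IsChain (fun x y => (y, x) ∈ l) (a :: t) →
    ∀ v ∈ a :: t, v ∈ pvGrowIter l t.length [a] := by
  intro t
  induction t with
  | nil =>
    intro a _ v hv
    simpa [pvGrowIter] using hv
  | cons b t ih =>
    intro a hch v hv
    have hab : (b, a) ∈ l := (List.isChain_cons_cons.mp hch).1
    have hch' : List.IsChain (fun x y => (y, x) ∈ l) (b :: t) := (List.isChain_cons_cons.mp hch).2
    have hstep : ∀ x ∈ pvGrowIter l t.length [b], x ∈ pvGrowIter l (b :: t).length [a] := by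
      intro x hx
      have h1 : ∀ y ∈ [b], y ∈ pvGrow l [a] := by
        intro y hy
        have : y = b := by simpa using hy
        subst this
        exact pvGrow_parent l (by simp) hab
      exact pvGrowIter_mono l t.length h1 x hx
    rcases List.mem_cons.mp hv with hv | hv
    · -- v = a
      rw [hv]
      exact pvGrowIter_le l (Nat.zero_le _) [a] a (by simp [pvGrowIter])
    · exact hstep v (ih b hch' v hv)

-- a nonempty level at depth k yields a parent-chain of k edges from node
theorem pvIter_chain (l : List (Int × Int)) (node : Int) :
    ∀ (k : Nat) (x : Int), x ∈ pvIter (pvBuildA l) k [node] →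
    ∃ p : List Int, List.IsChain (fun a b => (b, a) ∈ l) p ∧ p.length = k + 1 ∧
      p.head? = some node ∧ p.getLast? = some x := by
  intro k
  induction k with
  | zero =>
    intro x hx
    have hx' : x = node := by simpa [pvIter] using hx
    exact ⟨[node], by simp, by simp, rfl, by simp [hx']⟩
  | succ k ih =>
    intro x hx
    rw [pvIter_succ'] at hx
    rcases List.mem_flatMap.mp hx with ⟨c, hc, hxc⟩
    have hxl : (x, c) ∈ l := by
      rw [pvBuildA_getD] at hxc
      exact (pvParents_mem l c x).mp hxc
    rcases ih c hc with ⟨p, hch, hlen, hhd, hlast⟩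
    refine ⟨p ++ [x], ?_, by simp [hlen], ?_, by simp⟩
    · rw [List.isChain_append]
      refine ⟨hch, by simp, ?_⟩
      intro a ha y hy
      have ha' : c = a := by rw [hlast] at ha; simpa using ha
      have hy' : x = y := by simpa using hy
      rw [← ha', ← hy']; exact hxl
    · cases p with
      | nil => simp at hlen
      | cons h tl => simpa using hhd

theorem pvChain_tail_mem (l : List (Int × Int)) :
    ∀ (t : List Int) (a : Int), List.IsChain (fun x y => (y, x) ∈ l) (a :: t) →
    ∀ v ∈ t, v ∈ l.map Prod.fst := by
  intro t
  induction t with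
  | nil => intro a _ v hv; simp at hv
  | cons b t ih =>
    intro a hch v hv
    have hab : (b, a) ∈ l := (List.isChain_cons_cons.mp hch).1
    rcases List.mem_cons.mp hv with hv | hv
    · rw [hv]; exact List.mem_map.mpr ⟨(b, a), hab, rfl⟩
    · exact ih b (List.isChain_cons_cons.mp hch).2 v hv

theorem pvNot_nodup_decomp {α : Type} (t : List α) (h : ¬ t.Nodup) :
    ∃ xs v ys zs, t = xs ++ v :: ys ++ v :: zs := by
  induction t with
  | nil => exact absurd List.nodup_nil h
  | cons a t ih =>
    by_cases ha : a ∈ t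
    · rcases List.append_of_mem ha with ⟨ys, zs, hys⟩
      exact ⟨[], a, ys, zs, by simp [hys]⟩
    · have ht : ¬ t.Nodup := by
        intro hn
        exact h (List.nodup_cons.mpr ⟨ha, hn⟩)
      rcases ih ht with ⟨xs, v, ys, zs, hxs⟩
      exact ⟨a :: xs, v, ys, zs, by simp [hxs]⟩

-- under Pre_, the BFS levels die out after at most length+1 steps
theorem pvIter_empty (l : List (Int × Int)) (node : Int)
    (hpre : Pre_furtheast_ancestor l node) :
    pvIter (pvBuildA l) (l.length + 1) [node] = [] := by
  by_contra hne
  obtain ⟨x, hx⟩ := List.exists_mem_of_ne_nil _ hne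
  obtain ⟨p, hch, hlen, hhd, -⟩ := pvIter_chain l node (l.length + 1) x hx
  cases p with
  | nil => simp at hhd
  | cons h t =>
  have hh : node = h := (by simpa using hhd : h = node).symm
  subst hh
  have htlen : t.length = l.length + 1 := by simpa using hlen
  -- every element of t is a parent occurring in l; pigeonhole forces a duplicate
  have htmem : ∀ v ∈ t, v ∈ l.map Prod.fst := pvChain_tail_mem l t node hch
  have htnd : ¬ t.Nodup := by
    intro hnd
    have hsub : List.Subperm t (l.map Prod.fst) := hnd.subperm (fun v hv => htmem v hv)
    have := hsub.length_le
    simp [htlen] at this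
  obtain ⟨xs, v, ys, zs, ht⟩ := pvNot_nodup_decomp t htnd
  -- v is reachable from node
  have hvR : v ∈ pvGrowIter l (l.length + 1) [node] := by
    have hv : v ∈ node :: t := by
      simp [ht]
    have := pvChain_mem_growIter l t node hch v hv
    rwa [htlen] at this
  -- the chain segment from v back to v shows a cycle through v
  have hsplit : node :: t = (node :: xs) ++ ((v :: ys ++ [v]) ++ zs) := by
    simp [ht]
  rw [hsplit] at hch
  have hseg : List.IsChain (fun a b => (b, a) ∈ l) (v :: ys ++ [v]) :=
    ((List.isChain_append.mp ((List.isChain_append.mp hch).2.1)).1)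
  cases hys : ys ++ [v] with
  | nil => simp at hys
  | cons w t₂ =>
  have hseg' : List.IsChain (fun a b => (b, a) ∈ l) (v :: w :: t₂) := by
    rw [show (v :: ys ++ [v]) = v :: (ys ++ [v]) by simp, hys] at hseg
    exact hseg
  have hwv : (w, v) ∈ l := (List.isChain_cons_cons.mp hseg').1
  have hvmem : v ∈ w :: t₂ := by
    rw [← hys]; exact List.mem_append_right _ (by simp)
  have hvc : v ∈ pvGrowIter l t₂.length [w] :=
    pvChain_mem_growIter l t₂ w (List.isChain_cons_cons.mp hseg').2 v hvmem
  have hsubw : ∀ y ∈ [w], y ∈ pvParents l v := by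
    intro y hy
    have : y = w := by simpa using hy
    subst this
    exact (pvParents_mem l v y).mpr hwv
  have hvc' : v ∈ pvGrowIter l t₂.length (pvParents l v) :=
    pvGrowIter_mono l t₂.length hsubw v hvc
  have ht₂ : t₂.length ≤ l.length + 1 := by
    have h1 := congrArg List.length hys
    have h2 := congrArg List.length ht
    simp at h1 h2
    omega
  have hvc'' : v ∈ pvGrowIter l (l.length + 1) (pvParents l v) :=
    pvGrowIter_le l ht₂ _ v hvc'
  exact hpre v hvR hvc''

-- ===== VERDICT (by name: the statement is the Claim_ definition above) =====
theorem furtheast_ancestor_spec : Claim_equal_furtheast_ancestor := by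
  intro l node _ hpre
  unfold Spec_furtheast_ancestor furtheast_ancestor furtheast_ancestor_alt
  rw [pvBuild_eq]
  have h := pvBfs_eq_pvLv (pvBuildA l) (l.length + 1) [node] 0 none
      (pvFuelA (pvBuildA l) (l.length + 1) [node]) (l.length + 2)
      (pvIter_empty l node hpre) (le_refl _) (by omega)
  simpa using h
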